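-- pv_equiv track=rewrite | github.com/cecilpert/old_CSTB | scripts/allgenomes.py | treat_mismatch_reverse
-- ===== SOURCE A (Python) =====
-- def treat_mismatch_reverse(PAM,mm):
--     '''
--     Check if a mismatch is in the PAM motif. For reverse verification, check if the mismatch is in the last bases (depending on motif length).
--     '''
--     acgt=['A','C','G','T']
--     for base in acgt:
--         mm_pam=mm.split(base)[-1]
--         if mm_pam.isnumeric():
--             if int(mm_pam)<len(PAM):
--                 return True
--     return False
-- ===== SOURCE B (Python) =====
-- def treat_mismatch_reverse(PAM, mm):
--     '''
--     Check if a mismatch is in the PAM motif, by a single backward scan: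
--     collect the maximal numeric suffix of mm; it is the mismatch position
--     iff it is non-empty and preceded by nothing or by one of A/C/G/T.
--     '''
--     rev = mm[::-1]
--     run = ''
--     for c in rev:
--         if c.isnumeric():
--             run += c
--         else:
--             break
--     if run == '':
--         return False
--     if len(run) < len(rev) and rev[len(run)] not in ('A', 'C', 'G', 'T'):
--         return False
--     return int(run[::-1]) < len(PAM)
-- ===== Notes on version B (the rewrite author's own statement) =====
-- stated objective: simpler
-- what changed: A splits mm on each of the four bases A/C/G/T and tests the last chunk of each split; B does one backward scan collecting the maximal numeric suffix of mm and checks the single character in front of it.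
import Mathlib
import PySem

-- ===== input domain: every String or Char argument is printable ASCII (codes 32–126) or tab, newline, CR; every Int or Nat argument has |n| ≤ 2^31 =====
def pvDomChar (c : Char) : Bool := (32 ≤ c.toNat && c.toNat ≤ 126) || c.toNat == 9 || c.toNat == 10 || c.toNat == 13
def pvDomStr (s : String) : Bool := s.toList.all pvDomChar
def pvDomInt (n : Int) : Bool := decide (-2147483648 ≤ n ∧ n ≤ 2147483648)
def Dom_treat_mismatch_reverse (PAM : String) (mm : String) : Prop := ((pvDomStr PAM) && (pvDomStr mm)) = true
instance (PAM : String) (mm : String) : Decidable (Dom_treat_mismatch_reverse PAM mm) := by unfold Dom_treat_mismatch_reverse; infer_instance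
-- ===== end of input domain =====

-- B replaces A's four split-on-base passes by one backward scan collecting the
-- maximal numeric suffix (objective: simpler, one pass instead of four splits).
-- On the ASCII domain Dom_ both programs are total; str.isnumeric is ported as
-- PySem.Chars.isdigit and int(...) as (PySem.Int.ofChars? ...).getD 0, both
-- exact on the stated printable-ASCII domain (Python's isnumeric accepts, and
-- int() rejects, only non-ASCII characters beyond this).

-- ===== PORT A =====
-- the for-base loop of A, with early return True
def tmrLoopA (PAM : String) (mmL : List Char) : List Char → Bool
  | [] => false
  | b :: bs =>
      -- mm_pam = mm.split(base)[-1]  (split of a non-empty-sep is Chars.splitOn; [-1] via pyGetD)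
      let mm_pam := PySem.List.pyGetD (PySem.Chars.splitOn mmL [b]) (-1) []
      if PySem.Chars.strIsdigit mm_pam then              -- mm_pam.isnumeric(), exact on ASCII
        if (PySem.Int.ofChars? mm_pam).getD 0 < PySem.Str.len PAM then true
        else tmrLoopA PAM mmL bs
      else tmrLoopA PAM mmL bs

def treat_mismatch_reverse (PAM : String) (mm : String) : Bool :=
  tmrLoopA PAM mm.toList ['A', 'C', 'G', 'T']

-- ===== PORT B =====
-- the for-c-in-rev loop of B with break: collects the leading numeric run of rev
def tmrAltRun : List Char → List Char
  | [] => []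
  | c :: cs => if PySem.Chars.isdigit c then c :: tmrAltRun cs else []   -- c.isnumeric(), exact on ASCII

def treat_mismatch_reverse_alt (PAM : String) (mm : String) : Bool :=
  let rev := mm.toList.reverse                 -- rev = mm[::-1]
  let run := tmrAltRun rev
  if run = [] then false
  else if run.length < rev.length ∧
          PySem.List.pyGetD rev (run.length : Int) ' ' ∉ ['A', 'C', 'G', 'T'] then false
  else decide ((PySem.Int.ofChars? run.reverse).getD 0 < PySem.Str.len PAM)  -- int(run[::-1]) < len(PAM)

-- ===== PRECONDITION & SPEC =====
def Spec_treat_mismatch_reverse (PAM : String) (mm : String) (out : Bool) : Prop := out = treat_mismatch_reverse_alt PAM mm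
instance (PAM : String) (mm : String) (out : Bool) : Decidable (Spec_treat_mismatch_reverse PAM mm out) := by unfold Spec_treat_mismatch_reverse; infer_instance

-- ===== CLAIM (what is proved, stated in full; the proofs are below) =====
def Claim_equal_treat_mismatch_reverse : Prop := ∀ (PAM : String) (mm : String), Dom_treat_mismatch_reverse PAM mm → Spec_treat_mismatch_reverse PAM mm (treat_mismatch_reverse PAM mm)

-- ===== LEMMAS AND PROOFS =====

-- the split chunk A inspects, expressed on the reversed character list
def tBase (b : Char) (r : List Char) : List Char :=
  if b ∈ r then r.takeWhile (fun c => c != b) else r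

theorem tw_all {p : Char → Bool} {xs : List Char} (h : ∀ x ∈ xs, p x = true) :
    xs.takeWhile p = xs := by
  induction xs with
  | nil => rfl
  | cons c cs ih =>
      rw [List.takeWhile_cons_of_pos (h c (by simp)), ih fun x hx => h x (by simp [hx])]

theorem tw_append_all {p : Char → Bool} {xs : List Char} (ys : List Char)
    (h : ∀ x ∈ xs, p x = true) : (xs ++ ys).takeWhile p = xs ++ ys.takeWhile p := by
  induction xs with
  | nil => rfl
  | cons c cs ih =>
      simp only [List.cons_append, List.takeWhile_cons_of_pos (h c (by simp))]
      rw [ih fun x hx => h x (by simp [hx])]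

theorem tw_append_stop {p : Char → Bool} {xs : List Char} (ys : List Char)
    (h : ∃ x ∈ xs, p x = false) : (xs ++ ys).takeWhile p = xs.takeWhile p := by
  induction xs with
  | nil => simp at h
  | cons c cs ih =>
      by_cases hc : p c = true
      · have hcs : ∃ x ∈ cs, p x = false := by
          rcases h with ⟨x, hx, hpx⟩
          rcases List.mem_cons.mp hx with hx' | hx'
          · subst hx'; simp [hc] at hpx
          · exact ⟨x, hx', hpx⟩
        simp only [List.cons_append, List.takeWhile_cons_of_pos hc]
        rw [ih hcs]
      · rw [Bool.not_eq_true] at hc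
        rw [List.cons_append, List.takeWhile_cons_of_neg (by simp [hc]),
          List.takeWhile_cons_of_neg (by simp [hc])]

theorem tw_append_singleton_false {p : Char → Bool} {y : Char} (xs : List Char)
    (hy : p y = false) : (xs ++ [y]).takeWhile p = xs.takeWhile p := by
  by_cases h : ∀ x ∈ xs, p x = true
  · rw [tw_append_all _ h, tw_all h, List.takeWhile_cons_of_neg (by simp [hy])]
    simp
  · have h2 : ∃ x ∈ xs, p x = false := by
      rcases not_forall.mp h with ⟨x, hx⟩
      rcases Classical.not_imp.mp hx with ⟨hmem, hnp⟩
      exact ⟨x, hmem, by simpa using hnp⟩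
    rcases h2 with ⟨x, hx, hpx⟩
    exact tw_append_stop _ ⟨x, hx, by simpa using hpx⟩

-- the last chunk of PySem.Chars.splitOn by one separator char
theorem go_spec (b : Char) : ∀ (fuel : Nat) (l cur : List Char) (acc : List (List Char)),
    l.length ≤ fuel →
    ∃ pre, PySem.Chars.splitOn.go [b] fuel l cur acc =
      pre ++ [if b ∈ l then (l.reverse.takeWhile (fun c => c != b)).reverse
              else cur.reverse ++ l] := by
  intro fuel
  induction fuel with
  | zero =>
      intro l cur acc hl
      have : l = [] := List.length_eq_zero_iff.mp (Nat.le_zero.mp hl)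
      subst this
      exact ⟨acc.reverse, by simp [PySem.Chars.splitOn.go]⟩
  | succ fuel ih =>
      intro l cur acc hl
      cases l with
      | nil => exact ⟨acc.reverse, by simp [PySem.Chars.splitOn.go]⟩
      | cons c rest =>
          rw [PySem.Chars.splitOn.go]
          by_cases hcb : c = b
          · subst hcb
            have hpre : [c].isPrefixOf (c :: rest) = true := by simp [List.isPrefixOf]
            rw [if_pos hpre]
            obtain ⟨pre, hp⟩ := ih rest [] (cur.reverse :: acc) (by simpa using hl)
            refine ⟨pre, ?_⟩
            have hdrop : List.drop [c].length (c :: rest) = rest := by simp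
            rw [hdrop, hp]
            congr 1
            have hmem : c ∈ c :: rest := by simp
            rw [if_pos hmem]
            have hrw : ((c :: rest).reverse.takeWhile (fun x => x != c)).reverse
                = (rest.reverse.takeWhile (fun x => x != c)).reverse := by
              rw [List.reverse_cons, tw_append_singleton_false _ (by simp)]
            rw [hrw]
            by_cases hm : c ∈ rest
            · rw [if_pos hm]
            · rw [if_neg hm]
              rw [tw_all (p := fun x => x != c) ?_, List.reverse_reverse]
              · simp
              · intro x hx
                simp only [bne_iff_ne, ne_eq]
                intro hxc; subst hxc
                exact hm (by simpa using hx)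
          · have hpre : ¬ ([b].isPrefixOf (c :: rest) = true) := by
              simp [List.isPrefixOf]
              exact fun h => hcb h.symm
            rw [if_neg hpre]
            obtain ⟨pre, hp⟩ := ih rest (c :: cur) acc (by simpa using hl)
            refine ⟨pre, ?_⟩
            rw [hp]
            congr 1
            have hbc : ¬ b = c := fun h => hcb h.symm
            have hmemiff : (b ∈ c :: rest) ↔ (b ∈ rest) := by simp [hbc]
            by_cases hm : b ∈ rest
            · rw [if_pos hm, if_pos (hmemiff.mpr hm)]
              rw [List.reverse_cons, tw_append_stop]
              refine ⟨b, by simpa using hm, by simp⟩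
            · rw [if_neg hm, if_neg (fun h => hm (hmemiff.mp h))]
              simp

theorem split_last (b : Char) (L : List Char) :
    PySem.List.pyGetD (PySem.Chars.splitOn L [b]) (-1) [] = (tBase b L.reverse).reverse := by
  obtain ⟨pre, hp⟩ := go_spec b (L.length + 1) L [] [] (by omega)
  show PySem.List.pyGetD (PySem.Chars.splitOn.go [b] (L.length + 1) L [] []) (-1) [] = _
  rw [hp, PySem.List.pyGetD_neg_one_append_singleton]
  unfold tBase
  by_cases hm : b ∈ L
  · rw [if_pos hm, if_pos (by simpa using hm)]
  · rw [if_neg hm, if_neg (by simpa using hm)]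
    simp

theorem tmrAltRun_eq (r : List Char) : tmrAltRun r = r.takeWhile PySem.Chars.isdigit := by
  induction r with
  | nil => rfl
  | cons c cs ih => by_cases h : PySem.Chars.isdigit c <;> simp [tmrAltRun, h, ih]

theorem drop_head (p : Char → Bool) (r : List Char) (h : r.dropWhile p ≠ []) :
    ∃ c cs, r.dropWhile p = c :: cs ∧ p c = false := by
  rcases hd : r.dropWhile p with _ | ⟨c, cs⟩
  · exact absurd hd h
  · refine ⟨c, cs, rfl, ?_⟩
    have hh := List.head?_dropWhile_not p r
    rw [hd] at hh
    simpa using hh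

-- E1: if A's chunk for base b is numeric, it is the maximal digit suffix and b sits right before it
theorem chunk_numeric (b : Char) (r : List Char) (hb : PySem.Chars.isdigit b = false)
    (_hne : tBase b r ≠ []) (hall : ∀ x ∈ tBase b r, PySem.Chars.isdigit x = true) :
    tBase b r = r.takeWhile PySem.Chars.isdigit ∧
      ((r.dropWhile PySem.Chars.isdigit).head? = some b ∨ r.dropWhile PySem.Chars.isdigit = []) := by
  unfold tBase at *
  by_cases hm : b ∈ r
  · rw [if_pos hm] at hall ⊢
    have hd : r.dropWhile (fun c => c != b) ≠ [] := by
      intro h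
      have := List.dropWhile_eq_nil_iff.mp h
      simpa using this b hm
    obtain ⟨c0, rest', hdeq, hpc⟩ := drop_head _ r hd
    have hc0 : c0 = b := by simpa using hpc
    rw [hc0] at hdeq
    have hsplitr : r = r.takeWhile (fun c => c != b) ++ b :: rest' := by
      conv_lhs => rw [← List.takeWhile_append_dropWhile (p := fun c => c != b) (l := r)]
      rw [hdeq]
    constructor
    · conv_rhs => rw [hsplitr]
      rw [tw_append_all _ hall, List.takeWhile_cons_of_neg (by simp [hb])]
      simp
    · left
      conv_lhs => rw [hsplitr]
      rw [List.dropWhile_append]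
      have h0 : (r.takeWhile (fun c => c != b)).dropWhile PySem.Chars.isdigit = [] := by
        rw [List.dropWhile_eq_nil_iff]; exact hall
      simp [h0, List.dropWhile_cons_of_neg, hb]
  · rw [if_neg hm] at hall ⊢
    have htw : r.takeWhile PySem.Chars.isdigit = r := tw_all hall
    refine ⟨htw.symm, Or.inr ?_⟩
    rw [List.dropWhile_eq_nil_iff]; exact hall

-- E2: conversely, when the digit suffix is non-empty and b precedes it (or covers all of r),
-- A's chunk for base b IS that digit suffix
theorem chunk_of_run (b : Char) (r : List Char) (hb : PySem.Chars.isdigit b = false)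
    (hcond : (r.dropWhile PySem.Chars.isdigit).head? = some b ∨ r.dropWhile PySem.Chars.isdigit = []) :
    tBase b r = r.takeWhile PySem.Chars.isdigit := by
  rcases hcond with hhd | hnil
  · have hd : r.dropWhile PySem.Chars.isdigit ≠ [] := by
      intro h; rw [h] at hhd; simp at hhd
    obtain ⟨c0, rest', hdeq, _⟩ := drop_head _ r hd
    have hc0 : c0 = b := by rw [hdeq] at hhd; simpa using hhd
    rw [hc0] at hdeq
    have hsplitr : r = r.takeWhile PySem.Chars.isdigit ++ b :: rest' := by
      conv_lhs => rw [← List.takeWhile_append_dropWhile (p := PySem.Chars.isdigit) (l := r)]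
      rw [hdeq]
    have hmem : b ∈ r := by rw [hsplitr]; simp
    have hne : ∀ x ∈ r.takeWhile PySem.Chars.isdigit, (x != b) = true := by
      intro x hx
      have hxd := List.mem_takeWhile_imp hx
      simp only [bne_iff_ne, ne_eq]
      intro h; rw [h] at hxd; rw [hxd] at hb; exact absurd hb (by simp)
    unfold tBase
    rw [if_pos hmem]
    conv_lhs => rw [hsplitr]
    rw [tw_append_all _ hne, List.takeWhile_cons_of_neg (by simp)]
    simp
  · have hall := List.dropWhile_eq_nil_iff.mp hnil
    have hmem : b ∉ r := fun h => by simpa [hb] using hall b h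
    unfold tBase
    rw [if_neg hmem, tw_all hall]

theorem strIsdigit_rev (x : List Char) :
    PySem.Chars.strIsdigit x.reverse = (!x.isEmpty && x.all PySem.Chars.isdigit) := by
  simp [PySem.Chars.strIsdigit]

theorem cond_iff (b : Char) (r : List Char) (hb : PySem.Chars.isdigit b = false) :
    PySem.Chars.strIsdigit ((tBase b r).reverse) = true ↔
      (r.takeWhile PySem.Chars.isdigit ≠ [] ∧
        ((r.dropWhile PySem.Chars.isdigit).head? = some b ∨ r.dropWhile PySem.Chars.isdigit = [])) := by
  rw [strIsdigit_rev]
  constructor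
  · intro h
    simp only [Bool.and_eq_true, Bool.not_eq_eq_eq_not, Bool.not_true, List.isEmpty_eq_false_iff,
      List.all_eq_true] at h
    obtain ⟨heq, hcond⟩ := chunk_numeric b r hb h.1 h.2
    exact ⟨heq ▸ h.1, hcond⟩
  · rintro ⟨hrun, hcond⟩
    have heq := chunk_of_run b r hb hcond
    rw [heq]
    simp only [Bool.and_eq_true, Bool.not_eq_eq_eq_not, Bool.not_true, List.isEmpty_eq_false_iff,
      List.all_eq_true]
    exact ⟨hrun, fun x hx => List.mem_takeWhile_imp hx⟩

theorem main_eq (PAM mm : String) :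
    treat_mismatch_reverse PAM mm = treat_mismatch_reverse_alt PAM mm := by
  simp only [treat_mismatch_reverse, treat_mismatch_reverse_alt, tmrLoopA, split_last,
    tmrAltRun_eq]
  set r := mm.toList.reverse with hr
  by_cases hrun : r.takeWhile PySem.Chars.isdigit = []
  · -- no numeric suffix at all: both sides are false
    have hf : ∀ b : Char, PySem.Chars.isdigit b = false →
        PySem.Chars.strIsdigit ((tBase b r).reverse) = false := by
      intro b hb
      rw [Bool.eq_false_iff]
      intro h
      exact ((cond_iff b r hb).mp h).1 hrun
    rw [hf 'A' (by decide), hf 'C' (by decide), hf 'G' (by decide), hf 'T' (by decide)]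
    simp [hrun]
  · by_cases hrest : r.dropWhile PySem.Chars.isdigit = []
    · -- mm is entirely numeric: every base's chunk is mm itself
      have ht : ∀ b : Char, PySem.Chars.isdigit b = false →
          PySem.Chars.strIsdigit ((tBase b r).reverse) = true :=
        fun b hb => (cond_iff b r hb).mpr ⟨hrun, Or.inr hrest⟩
      have heq : ∀ b : Char, PySem.Chars.isdigit b = false →
          tBase b r = r.takeWhile PySem.Chars.isdigit :=
        fun b hb => chunk_of_run b r hb (Or.inr hrest)
      have hre : r.takeWhile PySem.Chars.isdigit = r := by
        conv_rhs => rw [← List.takeWhile_append_dropWhile (p := PySem.Chars.isdigit) (l := r)]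
        rw [hrest, List.append_nil]
      have hlen : ¬ ((r.takeWhile PySem.Chars.isdigit).length < r.length) := by
        rw [hre]
        exact lt_irrefl _
      rw [ht 'A' (by decide), heq 'A' (by decide), ht 'C' (by decide), heq 'C' (by decide),
        ht 'G' (by decide), heq 'G' (by decide), ht 'T' (by decide), heq 'T' (by decide)]
      simp [hrun, hlen]
    · -- some non-numeric char b0 immediately precedes the maximal numeric suffix
      obtain ⟨b0, rest', hdeq, hb0d⟩ := drop_head _ r hrest
      have hhd : (r.dropWhile PySem.Chars.isdigit).head? = some b0 := by rw [hdeq]; rfl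
      have hsplitr : r = r.takeWhile PySem.Chars.isdigit ++ b0 :: rest' := by
        conv_lhs => rw [← List.takeWhile_append_dropWhile (p := PySem.Chars.isdigit) (l := r)]
        rw [hdeq]
      have hlen : (r.takeWhile PySem.Chars.isdigit).length < r.length := by
        conv_rhs => rw [hsplitr]
        simp
      have hget : PySem.List.pyGetD r (((r.takeWhile PySem.Chars.isdigit).length : Nat) : Int) ' ' = b0 := by
        nth_rewrite 1 [hsplitr]
        rw [PySem.List.pyGetD_natCast]
        simp [List.getD_eq_getElem?_getD]
      have hcb : ∀ b : Char, PySem.Chars.isdigit b = false →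
          PySem.Chars.strIsdigit ((tBase b r).reverse) = decide (b0 = b) := by
        intro b hb
        by_cases he : b0 = b
        · subst he
          rw [(cond_iff b0 r hb).mpr ⟨hrun, Or.inl hhd⟩]
          simp
        · rw [decide_eq_false he, Bool.eq_false_iff]
          intro h
          rcases ((cond_iff b r hb).mp h).2 with h2 | h2
          · rw [hhd] at h2
            exact he (Option.some.inj h2)
          · exact hrest h2
      have heqv : tBase b0 r = r.takeWhile PySem.Chars.isdigit :=
        chunk_of_run b0 r hb0d (Or.inl hhd)
      rw [hcb 'A' (by decide), hcb 'C' (by decide), hcb 'G' (by decide), hcb 'T' (by decide)]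
      by_cases hA : b0 = 'A'
      · subst hA
        simp [heqv, hrun, hlen, hget]
      · by_cases hC : b0 = 'C'
        · subst hC
          simp [heqv, hrun, hlen, hget, hA]
        · by_cases hG : b0 = 'G'
          · subst hG
            simp [heqv, hrun, hlen, hget, hA, hC]
          · by_cases hT : b0 = 'T'
            · subst hT
              simp [heqv, hrun, hlen, hget, hA, hC, hG]
            · simp [hrun, hlen, hget, hA, hC, hG, hT]


-- ===== VERDICT (by name: the statement is the Claim_ definition above) =====
theorem treat_mismatch_reverse_spec : Claim_equal_treat_mismatch_reverse := by
  intro PAM mm _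
  unfold Spec_treat_mismatch_reverse
  exact main_eq PAM mm
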